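-- pv_equiv track=rewrite | github.com/dezsokee/diszkret_matematika | eloadas/eloadas_4.py | racionalis3
-- ===== SOURCE A (Python) =====
-- from math import gcd
--
-- def nextRac(x, y):
--     nrx = (2* (x//y)+1) * y - x
--     nry = y
--
--     g = gcd(nrx,nry)
--
--     return (nry //g, nrx //g)
--
-- def racionalis3(n):
--     if n < 1:
--         return []
--
--     x, y = 1, 1
--     L= [(x,y)]
--
--     for i in range (1, n):
--         x, y = nextRac(x, y)
--         L += [(x,y)]
--
--     return L
-- ===== SOURCE B (Python) =====
-- def racionalis3(n):
--     # Build Stern's diatomic sequence s[0..n+1], then emit adjacent pairs: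
--     # Calkin-Wilf term i is s[i]/s[i+1], already in lowest terms.
--     if n < 1:
--         return []
--     s = [0, 1]
--     for i in range(2, n + 2):
--         s.append(s[i // 2] if i % 2 == 0 else s[i // 2] + s[i // 2 + 1])
--     return [(s[i], s[i + 1]) for i in range(1, n + 1)]
-- ===== Notes on version B (the rewrite author's own statement) =====
-- stated objective: alternative
-- what changed: B builds Stern's diatomic sequence as a table (s[2k]=s[k], s[2k+1]=s[k]+s[k+1]) and emits adjacent pairs (s[i], s[i+1]), replacing A's sequential floor-division/gcd fraction recurrence; no gcd is needed since adjacent Stern values are coprime.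
import Mathlib
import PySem

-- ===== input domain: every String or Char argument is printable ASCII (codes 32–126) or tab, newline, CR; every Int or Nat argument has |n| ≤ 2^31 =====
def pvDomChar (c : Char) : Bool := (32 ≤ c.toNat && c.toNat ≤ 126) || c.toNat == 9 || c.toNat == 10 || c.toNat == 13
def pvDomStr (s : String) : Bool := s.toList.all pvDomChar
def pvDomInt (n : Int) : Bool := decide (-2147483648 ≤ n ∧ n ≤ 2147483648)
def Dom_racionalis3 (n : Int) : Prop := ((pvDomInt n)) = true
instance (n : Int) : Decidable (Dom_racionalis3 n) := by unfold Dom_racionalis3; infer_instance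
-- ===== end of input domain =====

-- B replaces A's per-term floor-division/gcd fraction recurrence by building Stern's
-- diatomic sequence as a table and emitting adjacent pairs (alternative algorithm, no gcd needed).

-- ===== PORT A =====
def pvNextRac (x y : Int) : Int × Int :=
  let nrx : Int := (2 * PySem.Int.floordiv x y + 1) * y - x
  let nry : Int := y
  let g : Int := (Int.gcd nrx nry : Int)
  (PySem.Int.floordiv nry g, PySem.Int.floordiv nrx g)

def racionalis3 (n : Int) : List (Int × Int) :=
  if n < 1 then []
  else
    let st := (PySem.List.pyRange 1 n 1).foldl
      (fun (s : (Int × Int) × List (Int × Int)) _ =>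
        let p := pvNextRac s.1.1 s.1.2
        (p, s.2 ++ [p]))
      ((1, 1), [(1, 1)])
    st.2

-- ===== PORT B =====
def racionalis3_alt (n : Int) : List (Int × Int) :=
  if n < 1 then []
  else
    let s := (PySem.List.pyRange 2 (n + 2) 1).foldl
      (fun (s : List Int) i =>
        s ++ [if PySem.Int.mod i 2 = 0
              then PySem.List.pyGetD s (PySem.Int.floordiv i 2) 0
              else PySem.List.pyGetD s (PySem.Int.floordiv i 2) 0
                   + PySem.List.pyGetD s (PySem.Int.floordiv i 2 + 1) 0])
      [0, 1]
    (PySem.List.pyRange 1 (n + 1) 1).map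
      (fun i => (PySem.List.pyGetD s i 0, PySem.List.pyGetD s (i + 1) 0))

-- ===== PRECONDITION & SPEC =====
def Spec_racionalis3 (n : Int) (out : List (Int × Int)) : Prop := out = racionalis3_alt n
instance (n : Int) (out : List (Int × Int)) : Decidable (Spec_racionalis3 n out) := by unfold Spec_racionalis3; infer_instance

-- ===== CLAIM (what is proved, stated in full; the proofs are below) =====
def Claim_equal_racionalis3 : Prop := ∀ (n : Int), Dom_racionalis3 n → Spec_racionalis3 n (racionalis3 n)

-- ===== LEMMAS AND PROOFS =====

-- Stern's diatomic sequence (proof-side model of both programs).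
def stern : Nat → Nat
  | 0 => 0
  | 1 => 1
  | n + 2 =>
    if _h : (n + 2) % 2 = 0 then stern ((n + 2) / 2)
    else stern ((n + 2) / 2) + stern ((n + 2) / 2 + 1)
decreasing_by all_goals omega

lemma stern_zero : stern 0 = 0 := by rw [stern]
lemma stern_one : stern 1 = 1 := by rw [stern]

lemma stern_two_mul (m : Nat) : stern (2 * m) = stern m := by
  match m with
  | 0 => rw [show 2 * 0 = 0 by ring]
  | m + 1 =>
    rw [show 2 * (m + 1) = (2 * m) + 2 by ring, stern]
    have h1 : (2 * m + 2) % 2 = 0 := by omega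
    have h2 : (2 * m + 2) / 2 = m + 1 := by omega
    simp [h1, h2]

lemma stern_two : stern 2 = 1 := by
  rw [show 2 = 2 * 1 by ring, stern_two_mul, stern_one]

lemma stern_two_mul_add_one (m : Nat) : stern (2 * m + 1) = stern m + stern (m + 1) := by
  match m with
  | 0 => simp [stern_zero, stern_one]
  | m + 1 =>
    rw [show 2 * (m + 1) + 1 = (2 * m + 1) + 2 by ring, stern]
    have h1 : (2 * m + 1 + 2) % 2 = 1 := by omega
    have h2 : (2 * m + 1 + 2) / 2 = m + 1 := by omega
    simp [h1, h2]

lemma stern_pos : ∀ m : Nat, 0 < stern (m + 1) := by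
  intro m
  induction m using Nat.strong_induction_on with
  | _ m ih =>
    match m with
    | 0 => simp [stern_one]
    | m + 1 =>
      rcases Nat.even_or_odd (m + 2) with ⟨k, hk⟩ | ⟨k, hk⟩
      · have hk1 : 1 ≤ k := by omega
        rw [show m + 1 + 1 = 2 * k by omega, stern_two_mul,
            show k = (k - 1) + 1 by omega]
        exact ih (k - 1) (by omega)
      · rw [show m + 1 + 1 = 2 * k + 1 by omega, stern_two_mul_add_one]
        have := ih k (by omega)
        omega

lemma stern_gcd : ∀ m : Nat, Nat.gcd (stern m) (stern (m + 1)) = 1 := by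
  intro m
  induction m using Nat.strong_induction_on with
  | _ m ih =>
    match m with
    | 0 => simp [stern_zero, stern_one]
    | m + 1 =>
      rcases Nat.even_or_odd (m + 1) with ⟨k, hk⟩ | ⟨k, hk⟩
      · rw [show m + 1 = 2 * k by omega, show 2 * k + 1 = 2 * k + 1 from rfl,
            stern_two_mul, stern_two_mul_add_one, Nat.add_comm (stern k),
            Nat.gcd_add_self_right]
        exact ih k (by omega)
      · rw [show m + 1 = 2 * k + 1 by omega, show 2 * k + 1 + 1 = 2 * (k + 1) by omega,
            stern_two_mul_add_one, stern_two_mul, Nat.gcd_comm,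
            Nat.gcd_add_self_right, Nat.gcd_comm]
        exact ih k (by omega)

lemma stern_newman : ∀ k : Nat, 1 ≤ k →
    (2 * (stern k / stern (k + 1)) + 1) * stern (k + 1) = stern (k + 2) + stern k := by
  intro k
  induction k using Nat.strong_induction_on with
  | _ k ih =>
    intro hk
    rcases Nat.even_or_odd k with ⟨m, hm⟩ | ⟨m, hm⟩
    · -- k = 2m, m ≥ 1
      have hm1 : 1 ≤ m := by omega
      rw [show k = 2 * m by omega, show 2 * m + 1 = 2 * m + 1 from rfl,
          show 2 * m + 2 = 2 * (m + 1) by ring,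
          stern_two_mul, stern_two_mul_add_one, stern_two_mul]
      have hlt : stern m < stern m + stern (m + 1) := by have := stern_pos m; omega
      rw [Nat.div_eq_of_lt hlt]
      ring
    · -- k = 2m+1
      match m, hm with
      | 0, _ =>
        have h3 : stern 3 = 2 := by
          rw [show 3 = 2 * 1 + 1 by ring, stern_two_mul_add_one, stern_one, stern_two]
        rw [show k = 1 by omega]
        simp [stern_one, stern_two, h3]
      | m + 1, _ =>
        have hm1 : 1 ≤ m + 1 := by omega
        have IH := ih (m + 1) (by omega) hm1
        have hb := stern_pos m
        rw [show k = 2 * (m + 1) + 1 by omega,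
            show 2 * (m + 1) + 1 + 1 = 2 * (m + 2) by ring,
            show 2 * (m + 1) + 1 + 2 = 2 * (m + 2) + 1 by ring,
            stern_two_mul_add_one, stern_two_mul, stern_two_mul_add_one]
        -- let a = stern (m+1), b = stern (m+2)
        have hdiv : (stern (m + 1) + stern (m + 2)) / stern (m + 2)
            = stern (m + 1) / stern (m + 2) + 1 :=
          Nat.add_div_right _ (stern_pos (m + 1))
        rw [hdiv]
        have expand : (2 * (stern (m + 1) / stern (m + 2) + 1) + 1) * stern (m + 2)
            = (2 * (stern (m + 1) / stern (m + 2)) + 1) * stern (m + 2) + 2 * stern (m + 2) := by ring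
        rw [expand, IH]
        simp only [show m + 1 + 2 = m + 2 + 1 by omega, show m + 1 + 1 = m + 2 by omega] at *
        omega

-- A's helper sends consecutive Stern values to the next consecutive pair.
lemma nextRac_stern (k : Nat) (hk : 1 ≤ k) :
    pvNextRac (stern k) (stern (k + 1)) = ((stern (k + 1) : Int), (stern (k + 2) : Int)) := by
  have hnew := stern_newman k hk
  have hq : PySem.Int.floordiv ((stern k : Nat) : Int) ((stern (k + 1) : Nat) : Int)
      = ((stern k / stern (k + 1) : Nat) : Int) := PySem.Int.floordiv_natCast _ _
  have hnrx : (2 * ((stern k / stern (k + 1) : Nat) : Int) + 1) * ((stern (k + 1) : Nat) : Int)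
      - ((stern k : Nat) : Int) = ((stern (k + 2) : Nat) : Int) := by
    have := congrArg (fun t : Nat => (t : Int)) hnew
    push_cast at this ⊢
    linarith
  have hgnat : Nat.gcd (stern (k + 2)) (stern (k + 1)) = 1 := by
    rw [Nat.gcd_comm]; exact stern_gcd (k + 1)
  simp only [pvNextRac, hq, hnrx]
  rw [Int.gcd_natCast_natCast, hgnat]
  simp

-- A's loop invariant: the running pair is a pair of consecutive Stern values.
lemma A_loop (N : Nat) (hN : 1 ≤ N) :
    (PySem.List.pyRange 1 (N : Int) 1).foldl
      (fun (s : (Int × Int) × List (Int × Int)) _ =>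
        let p := pvNextRac s.1.1 s.1.2
        (p, s.2 ++ [p]))
      ((1, 1), [(1, 1)])
    = (((stern N : Int), (stern (N + 1) : Int)),
       (List.range N).map (fun i => ((stern (i + 1) : Int), (stern (i + 2) : Int)))) := by
  induction N with
  | zero => omega
  | succ N ih =>
    by_cases h : N = 0
    · subst h
      rw [show ((0 + 1 : Nat) : Int) = 1 by norm_num,
          PySem.List.pyRange_one_eq_nil (le_refl 1)]
      simp [stern_one, stern_two, List.range_succ]
    · have hN1 : 1 ≤ N := by omega
      have hsplit : PySem.List.pyRange 1 (((N : Nat) : Int) + 1) 1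
          = PySem.List.pyRange 1 ((N : Nat) : Int) 1 ++ [((N : Nat) : Int)] :=
        PySem.List.pyRange_one_succ_right (by exact_mod_cast hN1)
      rw [show (((N + 1 : Nat)) : Int) = ((N : Nat) : Int) + 1 by push_cast; ring,
          hsplit, List.foldl_append, ih hN1]
      simp only [List.foldl_cons, List.foldl_nil]
      rw [List.range_succ]
      simp [nextRac_stern N hN1]

-- characterization of A's result
lemma A_char (N : Nat) (hN : 1 ≤ N) :
    racionalis3 (N : Int)
      = (List.range N).map (fun i => ((stern (i + 1) : Int), (stern (i + 2) : Int))) := by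
  unfold racionalis3
  rw [if_neg (not_lt.mpr (by exact_mod_cast hN))]
  exact congrArg Prod.snd (A_loop N hN)

-- characterization of B's table
lemma B_array (N : Nat) :
    (PySem.List.pyRange 2 ((N : Int) + 2) 1).foldl
      (fun (s : List Int) i =>
        s ++ [if PySem.Int.mod i 2 = 0
              then PySem.List.pyGetD s (PySem.Int.floordiv i 2) 0
              else PySem.List.pyGetD s (PySem.Int.floordiv i 2) 0
                   + PySem.List.pyGetD s (PySem.Int.floordiv i 2 + 1) 0])
      [0, 1]
      = (List.range (N + 2)).map (fun k => (stern k : Int)) := by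
  induction N with
  | zero =>
    rw [show ((0 : Nat) : Int) + 2 = 2 by norm_num,
        PySem.List.pyRange_one_eq_nil (le_refl 2)]
    simp [List.range_succ, stern_zero, stern_one]
  | succ N ih =>
    have hsplit : PySem.List.pyRange 2 (((N : Nat) : Int) + 2 + 1) 1
        = PySem.List.pyRange 2 (((N : Nat) : Int) + 2) 1 ++ [((N : Nat) : Int) + 2] :=
      PySem.List.pyRange_one_succ_right (by omega)
    rw [show (((N + 1 : Nat)) : Int) + 2 = ((N : Nat) : Int) + 2 + 1 by push_cast; ring,
        hsplit, List.foldl_append, ih]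
    simp only [List.foldl_cons, List.foldl_nil]
    rw [show ((N : Nat) : Int) + 2 = (((N + 2 : Nat)) : Int) by push_cast; ring]
    have hmod : PySem.Int.mod (((N + 2 : Nat)) : Int) 2 = (((N + 2) % 2 : Nat) : Int) := by
      exact_mod_cast PySem.Int.mod_natCast (N + 2) 2
    have hdiv : PySem.Int.floordiv (((N + 2 : Nat)) : Int) 2 = (((N + 2) / 2 : Nat) : Int) := by
      exact_mod_cast PySem.Int.floordiv_natCast (N + 2) 2
    rw [hmod, hdiv]
    rw [show (((N + 2) / 2 : Nat) : Int) + 1 = ((((N + 2) / 2 + 1 : Nat)) : Int) by push_cast; ring]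
    rw [PySem.List.pyGetD_natCast, PySem.List.pyGetD_natCast]
    rw [PySem.List.getD_map_range _ _ _ _ (show (N + 2) / 2 < N + 2 by omega)]
    have htail : List.range (N + 1 + 2) = List.range (N + 2) ++ [N + 2] := by
      rw [show N + 1 + 2 = (N + 2) + 1 by ring, List.range_succ]
    rcases Nat.even_or_odd (N + 2) with ⟨k, hk⟩ | ⟨k, hk⟩
    · rw [if_pos (by exact_mod_cast (show ((N + 2) % 2 : Nat) = 0 by omega))]
      have hs : stern (N + 2) = stern ((N + 2) / 2) := by
        conv_lhs => rw [show N + 2 = 2 * ((N + 2) / 2) by omega]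
        rw [stern_two_mul]
      rw [htail, List.map_append]
      simp [hs]
    · rw [if_neg (by
        intro hc
        have : ((N + 2) % 2 : Nat) = (0 : Nat) := by exact_mod_cast hc
        omega)]
      rw [PySem.List.getD_map_range _ _ _ _ (show (N + 2) / 2 + 1 < N + 2 by omega)]
      have hs : stern (N + 2) = stern ((N + 2) / 2) + stern ((N + 2) / 2 + 1) := by
        conv_lhs => rw [show N + 2 = 2 * ((N + 2) / 2) + 1 by omega]
        rw [stern_two_mul_add_one]
      rw [htail, List.map_append]
      simp [hs]

lemma B_char (N : Nat) (hN : 1 ≤ N) :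
    racionalis3_alt (N : Int)
      = (List.range N).map (fun i => ((stern (i + 1) : Int), (stern (i + 2) : Int))) := by
  unfold racionalis3_alt
  rw [if_neg (not_lt.mpr (by exact_mod_cast hN))]
  rw [B_array N]
  rw [PySem.List.pyRange_one 1 (((N : Nat) : Int) + 1),
      show (((N : Nat) : Int) + 1 - 1).toNat = N by omega, List.map_map]
  apply List.map_congr_left
  intro k hk
  have hkN : k < N := List.mem_range.mp hk
  simp only [Function.comp]
  rw [show (1 : Int) + (k : Int) = (((k + 1 : Nat)) : Int) by push_cast; ring]
  rw [show (((k + 1 : Nat)) : Int) + 1 = (((k + 2 : Nat)) : Int) by push_cast; ring]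
  rw [PySem.List.pyGetD_natCast, PySem.List.pyGetD_natCast]
  rw [PySem.List.getD_map_range _ _ _ _ (by omega),
      PySem.List.getD_map_range _ _ _ _ (by omega)]

-- ===== VERDICT (by name: the statement is the Claim_ definition above) =====
theorem racionalis3_spec : Claim_equal_racionalis3 := by
  intro n _
  unfold Spec_racionalis3
  by_cases h : n < 1
  · simp [racionalis3, racionalis3_alt, h]
  · have hn : 1 ≤ n := by omega
    have : n = ((n.toNat : Nat) : Int) := by omega
    rw [this, A_char n.toNat (by omega), B_char n.toNat (by omega)]
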